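-- pv_equiv track=rewrite | github.com/jdabrante/PRO | ut4/ejer/cycle_alphabet.py | aux_letter
-- ===== SOURCE A (Python) =====
-- def aux_letter (lim):
--     LETTERS = "abcdefghijklmnopqrstuvwxyz"
--     abc_len = len(LETTERS)
--     while lim > 0:
--         choose = min(abc_len, lim)
--         for i in range(choose):
--             yield LETTERS[i]
--         lim -= abc_len
-- ===== SOURCE B (Python) =====
-- def aux_letter(lim):
--     LETTERS = "abcdefghijklmnopqrstuvwxyz"
--     q, r = divmod(max(lim, 0), 26)
--     yield from LETTERS * q + LETTERS[:r]
-- ===== Notes on version B (the rewrite author's own statement) =====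
-- stated objective: alternative
-- what changed: Instead of A's while-loop that repeatedly subtracts the alphabet length and yields a block prefix per iteration, B computes q,r = divmod of the (clamped) limit by the alphabet length once and yields from the pre-built string LETTERS*q + LETTERS[:r] (whole-alphabet repetition plus one slice).
import Mathlib
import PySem

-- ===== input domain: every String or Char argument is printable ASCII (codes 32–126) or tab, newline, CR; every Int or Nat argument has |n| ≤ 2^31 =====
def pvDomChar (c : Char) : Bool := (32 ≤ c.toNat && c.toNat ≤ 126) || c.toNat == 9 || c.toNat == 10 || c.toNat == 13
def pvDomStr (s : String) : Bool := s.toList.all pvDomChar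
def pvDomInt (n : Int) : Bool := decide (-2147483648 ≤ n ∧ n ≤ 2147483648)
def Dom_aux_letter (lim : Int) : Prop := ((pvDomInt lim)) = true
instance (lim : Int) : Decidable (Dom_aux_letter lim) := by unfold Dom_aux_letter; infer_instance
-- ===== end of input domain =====

-- B replaces A's while-subtract-26 loop (yielding a block prefix per iteration) by one
-- divmod: q,r = divmod(max(lim,0),26), then yields the pre-built LETTERS*q + LETTERS[:r]
-- (alternative decomposition, same cost). Both ports model the generator as the list of
-- yielded one-char strings.

-- LETTERS, viewed as the list of its one-character strings (LETTERS[i] in Python is a string)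
def pvLetters : List String :=
  ["a","b","c","d","e","f","g","h","i","j","k","l","m",
   "n","o","p","q","r","s","t","u","v","w","x","y","z"]

-- ===== PORT A =====
-- while lim > 0: yield LETTERS[0..min(26,lim)); lim -= 26
def aux_letter (lim : Int) : List String :=
  if _h : lim > 0 then
    ((PySem.List.pyRange 0 (min 26 lim) 1).map
        (fun i => PySem.List.pyGetD pvLetters i "")) ++ aux_letter (lim - 26)
  else []
termination_by lim.toNat
decreasing_by omega

-- ===== PORT B =====
-- q, r = divmod(max(lim, 0), 26); yield from LETTERS * q + LETTERS[:r]
def aux_letter_alt (lim : Int) : List String :=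
  let q := PySem.Int.floordiv (max lim 0) 26
  let r := PySem.Int.mod (max lim 0) 26
  (List.replicate q.toNat pvLetters).flatten ++ PySem.List.slice pvLetters none (some r)

-- ===== PRECONDITION & SPEC =====
def Spec_aux_letter (lim : Int) (out : List String) : Prop := out = aux_letter_alt lim
instance (lim : Int) (out : List String) : Decidable (Spec_aux_letter lim out) := by unfold Spec_aux_letter; infer_instance

-- ===== CLAIM (what is proved, stated in full; the proofs are below) =====
def Claim_equal_aux_letter : Prop := ∀ (lim : Int), Dom_aux_letter lim → Spec_aux_letter lim (aux_letter lim)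

-- ===== LEMMAS AND PROOFS =====

-- the common normal form: k-th yielded letter
def pvCyc (k : Nat) : String := pvLetters.getD (k % 26) ""

lemma cyc_shift (k : Nat) : pvCyc (26 + k) = pvCyc k := by
  unfold pvCyc
  congr 1
  omega

lemma letters_eq_cyc : pvLetters = (List.range 26).map pvCyc := by decide

lemma take_eq_cyc : ∀ r < 27, pvLetters.take r = (List.range r).map pvCyc := by decide

lemma range_shift26 (m : Nat) :
    (List.range (26 + m)).map pvCyc = pvLetters ++ (List.range m).map pvCyc := by
  rw [List.range_add, List.map_append, List.map_map, letters_eq_cyc]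
  congr 1
  apply List.map_congr_left
  intro k _
  exact cyc_shift k

lemma staged_eq_cyc : ∀ (q r : Nat), r < 27 →
    (List.replicate q pvLetters).flatten ++ pvLetters.take r =
      (List.range (26 * q + r)).map pvCyc := by
  intro q
  induction q with
  | zero => intro r hr; simpa using take_eq_cyc r hr
  | succ n ih =>
      intro r hr
      have : 26 * (n + 1) + r = 26 + (26 * n + r) := by ring
      rw [this, range_shift26, List.replicate_succ, List.flatten_cons,
        List.append_assoc, ih r hr]

lemma alt_eq_cyc (lim : Int) :
    aux_letter_alt lim = (List.range lim.toNat).map pvCyc := by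
  unfold aux_letter_alt
  simp only []
  have hmax : max lim 0 = ((lim.toNat : Nat) : Int) := by omega
  rw [hmax, show (26 : Int) = ((26 : Nat) : Int) from rfl,
    PySem.Int.floordiv_natCast, PySem.Int.mod_natCast, Int.toNat_natCast,
    PySem.List.slice_to_natCast,
    staged_eq_cyc _ _ (by omega : lim.toNat % 26 < 27),
    show 26 * (lim.toNat / 26) + lim.toNat % 26 = lim.toNat by omega]

lemma block_small (n : Nat) (hn : n ≤ 26) :
    (PySem.List.pyRange 0 (n : Int) 1).map (fun i => PySem.List.pyGetD pvLetters i "") =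
      (List.range n).map pvCyc := by
  rw [show ((n : Int)) = (n : Int) - 0 + 0 by ring]
  rw [PySem.List.pyRange_one]
  simp only [List.map_map]
  apply List.map_congr_left
  intro k hk
  have hk' : k < n := List.mem_range.mp (by simpa using hk)
  simp only [Function.comp]
  rw [show (0 + (k : Int)) = ((k : Nat) : Int) by ring, PySem.List.pyGetD_natCast]
  unfold pvCyc
  congr 1
  omega

lemma a_eq_cyc (lim : Int) : aux_letter lim = (List.range lim.toNat).map pvCyc := by
  by_cases h : lim > 0
  · rw [aux_letter, dif_pos h]
    rcases le_or_gt lim 26 with hle | hgt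
    · have hrec : aux_letter (lim - 26) = [] := by
        rw [aux_letter, dif_neg (by omega)]
      have hmin : min 26 lim = ((lim.toNat : Nat) : Int) := by omega
      rw [hrec, hmin, block_small lim.toNat (by omega), List.append_nil]
    · have ih := a_eq_cyc (lim - 26)
      have hmin : min 26 lim = ((26 : Nat) : Int) := by omega
      rw [hmin, block_small 26 (by omega), ih]
      have hsplit : lim.toNat = 26 + (lim - 26).toNat := by omega
      rw [hsplit, range_shift26, letters_eq_cyc]
  · rw [aux_letter, dif_neg h]
    have : lim.toNat = 0 := by omega
    simp [this]
termination_by lim.toNat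
decreasing_by omega

-- ===== VERDICT (by name: the statement is the Claim_ definition above) =====
theorem aux_letter_spec : Claim_equal_aux_letter := by
  intro lim _
  unfold Spec_aux_letter
  rw [a_eq_cyc, alt_eq_cyc]
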